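-- pv_equiv track=rewrite | github.com/SatriaDivo/pktanalyzer | pktanalyzer/analysis.py | _get_size_distribution
-- ===== SOURCE A (Python) =====
-- from typing import List, Dict, Any, Union, Optional
--
-- def _get_size_distribution(sizes: List[int]) -> Dict[str, int]:
--     """Get packet size distribution in bins."""
--     bins = {
--         'tiny (0-64)': 0,
--         'small (65-128)': 0,
--         'medium (129-512)': 0,
--         'large (513-1024)': 0,
--         'jumbo (1025+)': 0
--     }
--
--     for size in sizes:
--         if size <= 64:
--             bins['tiny (0-64)'] += 1
--         elif size <= 128:
--             bins['small (65-128)'] += 1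
--         elif size <= 512:
--             bins['medium (129-512)'] += 1
--         elif size <= 1024:
--             bins['large (513-1024)'] += 1
--         else:
--             bins['jumbo (1025+)'] += 1
--
--     return bins
-- ===== SOURCE B (Python) =====
-- def _get_size_distribution(sizes):
--     """Get packet size distribution in bins."""
--     # Cumulative counting: one pass per threshold, bins are differences of
--     # cumulative counts (no per-element bin dispatch).
--     le = [sum(1 for s in sizes if s <= t) for t in (64, 128, 512, 1024)]
--     return {
--         'tiny (0-64)': le[0],
--         'small (65-128)': le[1] - le[0],
--         'medium (129-512)': le[2] - le[1],
--         'large (513-1024)': le[3] - le[2],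
--         'jumbo (1025+)': len(sizes) - le[3],
--     }
-- ===== Notes on version B (the rewrite author's own statement) =====
-- stated objective: alternative
-- what changed: Replaces the single-pass per-element if/elif histogram with staged cumulative counting: one counting pass per threshold (count of sizes <= t) and bin counts obtained as differences of these cumulative counts.
import Mathlib
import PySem

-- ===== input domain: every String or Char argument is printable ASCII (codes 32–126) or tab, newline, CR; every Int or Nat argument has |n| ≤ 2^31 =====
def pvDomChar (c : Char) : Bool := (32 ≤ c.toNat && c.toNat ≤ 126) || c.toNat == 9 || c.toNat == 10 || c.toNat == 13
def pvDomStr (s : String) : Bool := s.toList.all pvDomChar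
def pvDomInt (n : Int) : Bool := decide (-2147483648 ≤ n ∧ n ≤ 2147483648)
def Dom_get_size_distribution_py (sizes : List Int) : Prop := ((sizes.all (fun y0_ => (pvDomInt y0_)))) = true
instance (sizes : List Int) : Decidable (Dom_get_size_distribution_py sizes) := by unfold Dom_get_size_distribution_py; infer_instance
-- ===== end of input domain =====

-- B replaces A's per-element if/elif histogram loop with staged cumulative counting:
-- one counting pass per threshold, bins obtained as differences (objective: alternative).

-- ===== PORT A =====
-- one loop iteration of A: the if/elif cascade incrementing the dict entry, 'bins[k] += 1'
def pvStepA (bins : PySem.Dict String Int) (size : Int) : PySem.Dict String Int :=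
  if size ≤ 64 then bins.insert "tiny (0-64)" (bins.getD "tiny (0-64)" 0 + 1)
  else if size ≤ 128 then bins.insert "small (65-128)" (bins.getD "small (65-128)" 0 + 1)
  else if size ≤ 512 then bins.insert "medium (129-512)" (bins.getD "medium (129-512)" 0 + 1)
  else if size ≤ 1024 then bins.insert "large (513-1024)" (bins.getD "large (513-1024)" 0 + 1)
  else bins.insert "jumbo (1025+)" (bins.getD "jumbo (1025+)" 0 + 1)

def get_size_distribution_py (sizes : List Int) : List (String × Int) :=
  let bins : PySem.Dict String Int := PySem.Dict.ofList
    [("tiny (0-64)", 0), ("small (65-128)", 0), ("medium (129-512)", 0),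
     ("large (513-1024)", 0), ("jumbo (1025+)", 0)]
  (sizes.foldl pvStepA bins).items

-- ===== PORT B =====
-- le = [sum(1 for s in sizes if s <= t) for t in (64, 128, 512, 1024)]
def get_size_distribution_py_alt (sizes : List Int) : List (String × Int) :=
  let le : List Int :=
    ([64, 128, 512, 1024] : List Int).map (fun t => (sizes.countP (fun s => decide (s ≤ t)) : Int))
  [("tiny (0-64)", le.getD 0 0),
   ("small (65-128)", le.getD 1 0 - le.getD 0 0),
   ("medium (129-512)", le.getD 2 0 - le.getD 1 0),
   ("large (513-1024)", le.getD 3 0 - le.getD 2 0),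
   ("jumbo (1025+)", (sizes.length : Int) - le.getD 3 0)]

-- ===== PRECONDITION & SPEC =====
def Spec_get_size_distribution_py (sizes : List Int) (out : List (String × Int)) : Prop := out = get_size_distribution_py_alt sizes
instance (sizes : List Int) (out : List (String × Int)) : Decidable (Spec_get_size_distribution_py sizes out) := by unfold Spec_get_size_distribution_py; infer_instance

-- ===== CLAIM (what is proved, stated in full; the proofs are below) =====
def Claim_equal_get_size_distribution_py : Prop := ∀ (sizes : List Int), Dom_get_size_distribution_py sizes → Spec_get_size_distribution_py sizes (get_size_distribution_py sizes)

-- ===== LEMMAS AND PROOFS =====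

-- A's dict through the loop: the five fixed labels paired with the band counts of the list
lemma pvLoop_eq (sizes : List Int) : ∀ (c0 c1 c2 c3 c4 : Int),
    (sizes.foldl pvStepA (PySem.Dict.mk
      [("tiny (0-64)", c0), ("small (65-128)", c1), ("medium (129-512)", c2),
       ("large (513-1024)", c3), ("jumbo (1025+)", c4)])).items
    = [("tiny (0-64)", c0 + (sizes.countP (fun x => decide (x ≤ 64)) : Int)),
       ("small (65-128)", c1 + (sizes.countP (fun x => decide (64 < x ∧ x ≤ 128)) : Int)),
       ("medium (129-512)", c2 + (sizes.countP (fun x => decide (128 < x ∧ x ≤ 512)) : Int)),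
       ("large (513-1024)", c3 + (sizes.countP (fun x => decide (512 < x ∧ x ≤ 1024)) : Int)),
       ("jumbo (1025+)", c4 + (sizes.countP (fun x => decide (1024 < x)) : Int))] := by
  induction sizes with
  | nil => intro c0 c1 c2 c3 c4; simp
  | cons x xs ih =>
    intro c0 c1 c2 c3 c4
    simp only [List.foldl_cons]
    by_cases h0 : x ≤ 64
    · have hA : pvStepA (PySem.Dict.mk
          [("tiny (0-64)", c0), ("small (65-128)", c1), ("medium (129-512)", c2),
           ("large (513-1024)", c3), ("jumbo (1025+)", c4)]) x
        = PySem.Dict.mk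
          [("tiny (0-64)", c0 + 1), ("small (65-128)", c1), ("medium (129-512)", c2),
           ("large (513-1024)", c3), ("jumbo (1025+)", c4)] := by
        simp [pvStepA, h0, PySem.Dict.insert, PySem.Dict.getD, PySem.Dict.get?]
      rw [hA, ih]
      simp [List.countP_cons, h0]
      constructor
      · omega
      · omega
    · by_cases hb : x ≤ 128
      · have hA : pvStepA (PySem.Dict.mk
            [("tiny (0-64)", c0), ("small (65-128)", c1), ("medium (129-512)", c2),
             ("large (513-1024)", c3), ("jumbo (1025+)", c4)]) x
          = PySem.Dict.mk
            [("tiny (0-64)", c0), ("small (65-128)", c1 + 1), ("medium (129-512)", c2),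
             ("large (513-1024)", c3), ("jumbo (1025+)", c4)] := by
          simp [pvStepA, h0, hb, PySem.Dict.insert, PySem.Dict.getD, PySem.Dict.get?]
        rw [hA, ih]
        simp [List.countP_cons, h0, hb]
        omega
      · by_cases hc : x ≤ 512
        · have hA : pvStepA (PySem.Dict.mk
              [("tiny (0-64)", c0), ("small (65-128)", c1), ("medium (129-512)", c2),
               ("large (513-1024)", c3), ("jumbo (1025+)", c4)]) x
            = PySem.Dict.mk
              [("tiny (0-64)", c0), ("small (65-128)", c1), ("medium (129-512)", c2 + 1),
               ("large (513-1024)", c3), ("jumbo (1025+)", c4)] := by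
            simp [pvStepA, h0, hb, hc, PySem.Dict.insert, PySem.Dict.getD, PySem.Dict.get?]
          rw [hA, ih]
          simp [List.countP_cons, h0, hb, hc]
          omega
        · by_cases hd : x ≤ 1024
          · have hA : pvStepA (PySem.Dict.mk
                [("tiny (0-64)", c0), ("small (65-128)", c1), ("medium (129-512)", c2),
                 ("large (513-1024)", c3), ("jumbo (1025+)", c4)]) x
              = PySem.Dict.mk
                [("tiny (0-64)", c0), ("small (65-128)", c1), ("medium (129-512)", c2),
                 ("large (513-1024)", c3 + 1), ("jumbo (1025+)", c4)] := by
              simp [pvStepA, h0, hb, hc, hd, PySem.Dict.insert, PySem.Dict.getD, PySem.Dict.get?]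
            rw [hA, ih]
            simp [List.countP_cons, h0, hb, hc, hd]
            omega
          · have hA : pvStepA (PySem.Dict.mk
                [("tiny (0-64)", c0), ("small (65-128)", c1), ("medium (129-512)", c2),
                 ("large (513-1024)", c3), ("jumbo (1025+)", c4)]) x
              = PySem.Dict.mk
                [("tiny (0-64)", c0), ("small (65-128)", c1), ("medium (129-512)", c2),
                 ("large (513-1024)", c3), ("jumbo (1025+)", c4 + 1)] := by
              simp [pvStepA, h0, hb, hc, hd, PySem.Dict.insert, PySem.Dict.getD, PySem.Dict.get?]
            rw [hA, ih]
            simp [List.countP_cons, h0, hb, hc, hd]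
            omega

-- cumulative count at a larger threshold = count at the smaller + the band in between
lemma pvSplit (t1 t2 : Int) (h : t1 ≤ t2) (sizes : List Int) :
    sizes.countP (fun x => decide (x ≤ t2))
      = sizes.countP (fun x => decide (x ≤ t1)) + sizes.countP (fun x => decide (t1 < x ∧ x ≤ t2)) := by
  induction sizes with
  | nil => rfl
  | cons x xs ih =>
    simp only [List.countP_cons, ih]
    split_ifs with h1 h2 h3 <;> simp_all <;> omega

-- total length = count ≤ t + count > t
lemma pvTotal (t : Int) (sizes : List Int) :
    sizes.length = sizes.countP (fun x => decide (x ≤ t)) + sizes.countP (fun x => decide (t < x)) := by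
  induction sizes with
  | nil => rfl
  | cons x xs ih =>
    simp only [List.countP_cons, List.length_cons, ih]
    split_ifs with h1 h2 <;> simp_all <;> omega

-- ===== VERDICT (by name: the statement is the Claim_ definition above) =====
theorem get_size_distribution_py_spec : Claim_equal_get_size_distribution_py := by
  intro sizes _
  show get_size_distribution_py sizes = get_size_distribution_py_alt sizes
  have h := pvLoop_eq sizes 0 0 0 0 0
  have s1 := pvSplit 64 128 (by omega) sizes
  have s2 := pvSplit 128 512 (by omega) sizes
  have s3 := pvSplit 512 1024 (by omega) sizes
  have s4 := pvTotal 1024 sizes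
  have hd : (PySem.Dict.ofList
      [("tiny (0-64)", (0:Int)), ("small (65-128)", 0), ("medium (129-512)", 0),
       ("large (513-1024)", 0), ("jumbo (1025+)", 0)])
      = PySem.Dict.mk
      [("tiny (0-64)", (0:Int)), ("small (65-128)", 0), ("medium (129-512)", 0),
       ("large (513-1024)", 0), ("jumbo (1025+)", 0)] := by rfl
  simp only [get_size_distribution_py, get_size_distribution_py_alt]
  rw [hd, h]
  simp only [List.map, List.getD, List.getElem?_cons_zero, List.getElem?_cons_succ, Option.getD_some]
  simp only [List.cons.injEq, Prod.mk.injEq, and_true, true_and]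
  refine ⟨by omega, by omega, by omega, by omega, by omega⟩
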